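-- pv_equiv track=rewrite | github.com/hexotic/hph | src/hph.py | highlight_substrings
-- ===== SOURCE A (Python) =====
-- def highlight_substrings(substr_list, set_list, stride):
--     """
--     Format data in order to highlight chunks of data according to their set.
--     """
--
--     new_s = []
--     prev_set = None
--     for idx, substr in enumerate(substr_list):
--         substr_set = set_list[idx]
--
--         if prev_set is None and substr_set is None:
--             new_s.append(substr[0:stride])
--
--         elif prev_set is None and substr_set is not None:
--             new_s.append("""<span class="set_{0}">""".format(substr_set))
--             new_s.append(substr[0:stride])
--
--         elif prev_set is not None and substr_set is not None:
--             if prev_set != substr_set: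
--                 new_s.append("""</span><span class="set_{0}">""".format(substr_set))
--             new_s.append(substr[0:stride])
--
--         elif prev_set is not None and substr_set is None:
--             # Previous substring belong to a set and current substring does not belong to a set
--             new_s.append("""</span>""")
--             new_s.append(substr[0:stride])
--
--         prev_set = substr_set
--
--
--     # Check if last set was None, if not end it properly
--     if substr_set is not None:
--         new_s.append("""</span>""")
--
--     return "".join(new_s)
-- ===== SOURCE B (Python) =====
-- def highlight_substrings(substr_list, set_list, stride):
--     """
--     Format data in order to highlight chunks of data according to their set.
--
--     Re-implementation: pre-slice everything into (piece, set) pairs, then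
--     consume the pairs run by run (a run = maximal block of equal set value),
--     rendering each non-None run as one self-contained <span>...</span> block.
--     """
--     pairs = [(substr_list[i][0:stride], set_list[i]) for i in range(len(substr_list))]
--     n = len(pairs)
--     out = []
--     i = 0
--     while i < n:
--         key = pairs[i][1]
--         j = i + 1
--         while j < n and pairs[j][1] == key:
--             j += 1
--         body = "".join(piece for piece, _ in pairs[i:j])
--         if key is None:
--             out.append(body)
--         else:
--             out.append('<span class="set_{0}">{1}</span>'.format(key, body))
--         i = j
--     return "".join(out)
-- ===== Notes on version B (the rewrite author's own statement) =====
-- stated objective: alternative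
-- what changed: A is a single-pass state machine that compares each element's set with the previous one to decide which tag fragments to emit; B first pre-slices everything into (piece, set) pairs and then consumes the list run by run (maximal blocks of equal set value), rendering each non-None run as one self-contained <span>...</span> block.
import Mathlib
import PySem

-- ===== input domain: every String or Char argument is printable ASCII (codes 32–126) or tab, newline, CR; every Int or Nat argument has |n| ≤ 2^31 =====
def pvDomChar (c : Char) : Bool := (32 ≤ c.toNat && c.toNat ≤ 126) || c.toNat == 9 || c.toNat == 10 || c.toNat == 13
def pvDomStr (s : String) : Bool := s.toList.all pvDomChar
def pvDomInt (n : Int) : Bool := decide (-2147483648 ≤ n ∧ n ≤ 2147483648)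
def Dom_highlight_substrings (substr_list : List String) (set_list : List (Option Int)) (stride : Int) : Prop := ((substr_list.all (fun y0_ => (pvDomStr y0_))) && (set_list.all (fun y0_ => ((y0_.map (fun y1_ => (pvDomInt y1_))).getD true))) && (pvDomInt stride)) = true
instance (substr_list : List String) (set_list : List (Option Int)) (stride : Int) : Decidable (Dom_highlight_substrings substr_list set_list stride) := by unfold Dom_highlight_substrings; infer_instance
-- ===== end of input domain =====

-- B replaces A's per-element prev_set state machine by a run-grouping pass: pre-slice into
-- (piece, set) pairs, then render each maximal run of equal set value as one self-contained
-- <span>...</span> block (objective: alternative decomposition, same cost).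


-- ===== PORT A =====
-- '"""<span class="set_{0}">""".format(substr_set)' (substr_set is an int in every branch that calls this)
def pvTag (k : Option Int) : String :=
  "<span class=\"set_" ++ (match k with | some n => PySem.Int.toStr n | none => "None") ++ "\">"

-- Transliteration notes (both exact on every input where Python A returns):
-- * 'for idx, substr in enumerate(substr_list): substr_set = set_list[idx]' reads the two lists
--   in lockstep, so it is ported as a fold over 'substr_list.zip set_list'; where set_list is
--   shorter Python raises IndexError — those inputs are excluded by Pre_.
-- * the trailing 'if substr_set is not None' reads the loop variable, which equals the carried
--   prev_set after every iteration; on empty substr_list Python raises NameError — excluded by Pre_.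
def highlight_substrings (substr_list : List String) (set_list : List (Option Int)) (stride : Int) : String :=
  let st := (substr_list.zip set_list).foldl
    (fun (st : List String × Option Int) (p : String × Option Int) =>
      let prev_set := st.2
      let substr_set := p.2
      if prev_set = none ∧ substr_set = none then
        (st.1 ++ [PySem.Str.slice p.1 (some 0) (some stride)], substr_set)
      else if prev_set = none ∧ substr_set ≠ none then
        (st.1 ++ [pvTag substr_set, PySem.Str.slice p.1 (some 0) (some stride)], substr_set)
      else if prev_set ≠ none ∧ substr_set ≠ none then
        ((if prev_set ≠ substr_set then st.1 ++ ["</span>" ++ pvTag substr_set] else st.1)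
           ++ [PySem.Str.slice p.1 (some 0) (some stride)], substr_set)
      else
        (st.1 ++ ["</span>", PySem.Str.slice p.1 (some 0) (some stride)], substr_set))
    ([], none)
  String.join (if st.2 ≠ none then st.1 ++ ["</span>"] else st.1)

-- ===== PORT B =====
-- Source B's outer loop walks an index i over 'pairs'; here the suffix pairs[i:] is the recursion
-- argument: the inner 'while j < n and pairs[j][1] == key' scan is takeWhile/dropWhile of the
-- suffix, and 'i = j' is recursing on the dropWhile remainder. fuel = list length only makes
-- the recursion on the shrinking suffix structural (never exhausted).
def pvRenderGo (fuel : Nat) (l : List (String × Option Int)) : String :=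
  match l with
  | [] => ""
  | (piece, key) :: rest =>
    match fuel with
    | 0 => ""
    | fuel + 1 =>
      let run := piece :: (rest.takeWhile (fun q => decide (q.2 = key))).map Prod.fst
      let body := String.join run
      (if key = none then body else pvTag key ++ body ++ "</span>")
        ++ pvRenderGo fuel (rest.dropWhile (fun q => decide (q.2 = key)))

-- Source B's outer 'while i < n' loop, started at i = 0
def pvRender (l : List (String × Option Int)) : String := pvRenderGo l.length l

def highlight_substrings_alt (substr_list : List String) (set_list : List (Option Int)) (stride : Int) : String :=
  -- 'pairs = [(substr_list[i][0:stride], set_list[i]) for i in range(len(substr_list))]'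
  -- (lockstep indexing = zip; IndexError where set_list is shorter — excluded by Pre_)
  pvRender ((substr_list.zip set_list).map
    (fun p => (PySem.Str.slice p.1 (some 0) (some stride), p.2)))

-- ===== PRECONDITION & SPEC =====
-- Pre_ is exactly where Python A returns: on empty substr_list it raises NameError (substr_set
-- unbound), and when set_list is shorter than substr_list it raises IndexError.
def Pre_highlight_substrings (substr_list : List String) (set_list : List (Option Int)) (stride : Int) : Prop :=
  substr_list ≠ [] ∧ substr_list.length ≤ set_list.length
instance (substr_list : List String) (set_list : List (Option Int)) (stride : Int) : Decidable (Pre_highlight_substrings substr_list set_list stride) := by unfold Pre_highlight_substrings; infer_instance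

def pvWitness_highlight_substrings : List String × List (Option Int) × Int :=
  (["ab", "cd", "ef"], [some 1, some 1, none], 1)

def Spec_highlight_substrings (substr_list : List String) (set_list : List (Option Int)) (stride : Int) (out : String) : Prop := out = highlight_substrings_alt substr_list set_list stride
instance (substr_list : List String) (set_list : List (Option Int)) (stride : Int) (out : String) : Decidable (Spec_highlight_substrings substr_list set_list stride out) := by unfold Spec_highlight_substrings; infer_instance

-- ===== CLAIM (what is proved, stated in full; the proofs are below) =====
def Claim_equal_highlight_substrings : Prop := ∀ (substr_list : List String) (set_list : List (Option Int)) (stride : Int), Dom_highlight_substrings substr_list set_list stride → Pre_highlight_substrings substr_list set_list stride → Spec_highlight_substrings substr_list set_list stride (highlight_substrings substr_list set_list stride)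


-- ===== LEMMAS AND PROOFS =====

-- String.join bookkeeping (not in Mathlib)
theorem pvJoin_foldl (xs : List String) (a : String) :
    xs.foldl (fun r s => r ++ s) a = a ++ String.join xs := by
  induction xs generalizing a with
  | nil => simp [String.join]
  | cons x xs ih =>
    rw [List.foldl_cons, ih]
    conv_rhs => rw [String.join, List.foldl_cons]
    rw [ih]
    simp [String.append_assoc]

theorem pvJoin_nil : String.join [] = "" := rfl

theorem pvJoin_cons (x : String) (xs : List String) :
    String.join (x :: xs) = x ++ String.join xs := by
  rw [String.join, List.foldl_cons, pvJoin_foldl]; simp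

theorem pvJoin_append (xs ys : List String) :
    String.join (xs ++ ys) = String.join xs ++ String.join ys := by
  rw [String.join, List.foldl_append, pvJoin_foldl, pvJoin_foldl]; simp

-- pvRenderGo ignores the exact fuel as long as it covers the list length
theorem pvRenderGo_fuel : ∀ (f₁ f₂ : Nat) (l : List (String × Option Int)),
    l.length ≤ f₁ → l.length ≤ f₂ → pvRenderGo f₁ l = pvRenderGo f₂ l := by
  intro f₁
  induction f₁ with
  | zero =>
    intro f₂ l h1 _
    match l with
    | [] => simp [pvRenderGo]
    | _ :: _ => simp at h1
  | succ f₁ ih =>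
    intro f₂ l h1 h2
    match l, f₂ with
    | [], _ => simp [pvRenderGo]
    | _ :: _, 0 => simp at h2
    | (piece, key) :: rest, f₂ + 1 =>
      simp only [pvRenderGo]
      have hd : (rest.dropWhile (fun q => decide (q.2 = key))).length ≤ rest.length :=
        List.length_dropWhile_le _ _
      simp only [List.length_cons, Nat.succ_le_succ_iff] at h1 h2
      rw [ih f₂ _ (le_trans hd h1) (le_trans hd h2)]

theorem pvRender_nil : pvRender [] = "" := rfl

theorem pvRender_cons (piece : String) (key : Option Int) (rest : List (String × Option Int)) :
    pvRender ((piece, key) :: rest) =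
      (if key = none then String.join (piece :: (rest.takeWhile (fun q => decide (q.2 = key))).map Prod.fst)
       else pvTag key ++ String.join (piece :: (rest.takeWhile (fun q => decide (q.2 = key))).map Prod.fst) ++ "</span>")
        ++ pvRender (rest.dropWhile (fun q => decide (q.2 = key))) := by
  show pvRenderGo (rest.length + 1) _ = _
  simp only [pvRenderGo]
  rw [pvRenderGo_fuel rest.length _ _ (List.length_dropWhile_le _ _) (le_refl _)]
  rfl

-- prepending a piece with set None just prepends the piece
theorem pvRender_cons_none (piece : String) (rest : List (String × Option Int)) :
    pvRender ((piece, none) :: rest) = piece ++ pvRender rest := by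
  rw [pvRender_cons]
  match rest with
  | [] => simp [pvRender_nil, pvJoin_cons, pvJoin_nil]
  | (p', k') :: rest' =>
    by_cases hk : k' = (none : Option Int)
    · subst hk
      rw [pvRender_cons]
      simp [pvJoin_cons, String.append_assoc]
    · have : (decide (((p', k') : String × Option Int).2 = (none : Option Int))) = false := by
        simpa using hk
      simp only [List.takeWhile_cons, List.dropWhile_cons, this, Bool.false_eq_true,
        ite_false, List.map_nil]
      simp [pvJoin_cons, pvJoin_nil]

-- A's loop remainder, given the carried prev_set: the current open run (if any) is flushed,
-- then the rest renders run by run.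
def pvRest : Option Int → List (String × Option Int) → String
  | none, l => pvRender l
  | some k, l =>
      String.join ((l.takeWhile (fun q => decide (q.2 = some k))).map Prod.fst)
        ++ "</span>" ++ pvRender (l.dropWhile (fun q => decide (q.2 = some k)))

def pvStep : (List String × Option Int) → (String × Option Int) → (List String × Option Int) :=
  fun st p =>
    let prev_set := st.2
    let substr_set := p.2
    if prev_set = none ∧ substr_set = none then
      (st.1 ++ [p.1], substr_set)
    else if prev_set = none ∧ substr_set ≠ none then
      (st.1 ++ [pvTag substr_set, p.1], substr_set)
    else if prev_set ≠ none ∧ substr_set ≠ none then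
      ((if prev_set ≠ substr_set then st.1 ++ ["</span>" ++ pvTag substr_set] else st.1)
         ++ [p.1], substr_set)
    else
      (st.1 ++ ["</span>", p.1], substr_set)

-- the main invariant: A's fold from any state equals the joined accumulator plus the remainder
theorem pvMain : ∀ (l : List (String × Option Int)) (acc : List String) (prev : Option Int),
    (let st := l.foldl pvStep (acc, prev)
     String.join (if st.2 ≠ none then st.1 ++ ["</span>"] else st.1))
      = String.join acc ++ pvRest prev l := by
  intro l
  induction l with
  | nil =>
    intro acc prev
    match prev with
    | none => simp [pvRest, pvRender_nil]
    | some k =>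
      simp [pvRest, pvRender_nil, pvJoin_append, pvJoin_cons, pvJoin_nil]
  | cons p l ih =>
    intro acc prev
    obtain ⟨piece, key⟩ := p
    match prev, key with
    | none, none =>
      simp only [List.foldl_cons]
      have hs : pvStep (acc, none) (piece, none) = (acc ++ [piece], none) := by
        simp [pvStep]
      rw [hs, ih]
      simp [pvRest, pvRender_cons_none, pvJoin_append, pvJoin_cons, pvJoin_nil, String.append_assoc]
    | none, some k =>
      simp only [List.foldl_cons]
      have hs : pvStep (acc, none) (piece, some k) = (acc ++ [pvTag (some k), piece], some k) := by
        simp [pvStep]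
      rw [hs, ih]
      simp only [pvRest, pvRender_cons]
      simp [pvJoin_append, pvJoin_cons, pvJoin_nil, String.append_assoc]
    | some k, none =>
      simp only [List.foldl_cons]
      have hs : pvStep (acc, some k) (piece, none) = (acc ++ ["</span>", piece], none) := by
        simp [pvStep]
      rw [hs, ih]
      simp only [pvRest]
      have ht : (decide (((piece, none) : String × Option Int).2 = some k)) = false := by simp
      simp only [List.takeWhile_cons, List.dropWhile_cons, ht, Bool.false_eq_true, ite_false,
        List.map_nil]
      rw [pvRender_cons_none]
      simp [pvJoin_append, pvJoin_cons, pvJoin_nil, String.append_assoc]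
    | some k, some k' =>
      simp only [List.foldl_cons]
      by_cases he : k = k'
      · subst he
        have hs : pvStep (acc, some k) (piece, some k) = (acc ++ [piece], some k) := by
          simp [pvStep]
        rw [hs, ih]
        simp only [pvRest]
        have ht : (decide (((piece, some k) : String × Option Int).2 = some k)) = true := by simp
        simp only [List.takeWhile_cons, List.dropWhile_cons]
        simp [pvJoin_append, pvJoin_cons, pvJoin_nil, String.append_assoc]
      · have hs : pvStep (acc, some k) (piece, some k') =
            (acc ++ ["</span>" ++ pvTag (some k')] ++ [piece], some k') := by
          simp [pvStep, he]
        rw [hs, ih]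
        simp only [pvRest]
        have ht : (decide (((piece, some k') : String × Option Int).2 = some k)) = false := by
          simp
          omega
        simp only [List.takeWhile_cons, List.dropWhile_cons, ht, Bool.false_eq_true, ite_false,
          List.map_nil]
        rw [pvRender_cons]
        simp [pvJoin_append, pvJoin_cons, pvJoin_nil, String.append_assoc]

-- ===== VERDICT (by name: the statement is the Claim_ definition above) =====
theorem highlight_substrings_spec : Claim_equal_highlight_substrings := by
  intro substr_list set_list stride _ _
  show highlight_substrings substr_list set_list stride
      = highlight_substrings_alt substr_list set_list stride
  unfold highlight_substrings highlight_substrings_alt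
  rw [show (substr_list.zip set_list).foldl
        (fun (st : List String × Option Int) (p : String × Option Int) =>
          let prev_set := st.2
          let substr_set := p.2
          if prev_set = none ∧ substr_set = none then
            (st.1 ++ [PySem.Str.slice p.1 (some 0) (some stride)], substr_set)
          else if prev_set = none ∧ substr_set ≠ none then
            (st.1 ++ [pvTag substr_set, PySem.Str.slice p.1 (some 0) (some stride)], substr_set)
          else if prev_set ≠ none ∧ substr_set ≠ none then
            ((if prev_set ≠ substr_set then st.1 ++ ["</span>" ++ pvTag substr_set] else st.1)
               ++ [PySem.Str.slice p.1 (some 0) (some stride)], substr_set)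
          else
            (st.1 ++ ["</span>", PySem.Str.slice p.1 (some 0) (some stride)], substr_set))
        ([], none)
      = ((substr_list.zip set_list).map
          (fun p => (PySem.Str.slice p.1 (some 0) (some stride), p.2))).foldl pvStep ([], none)
    from by rw [List.foldl_map]; rfl]
  have := pvMain ((substr_list.zip set_list).map
    (fun p => (PySem.Str.slice p.1 (some 0) (some stride), p.2))) [] none
  simp only at this
  rw [this]
  simp [pvRest, pvJoin_nil]
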